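-- pv_equiv track=rewrite | github.com/agoessling/stuff_sack | message_pack.py | _bytes_for_bits
-- ===== SOURCE A (Python) =====
-- def _bytes_for_bits(bits):
--   if bits < 0:
--     raise ValueError('Negative bits not allowed.')
--
--   raw_bytes = (bits - 1) // 8 + 1
--
--   for x in [1, 2, 4, 8]:
--     if x >= raw_bytes:
--       return x
--
--   raise ValueError('Value greater than 8 bytes.'.format(value))
-- ===== SOURCE B (Python) =====
-- def _bytes_for_bits(bits):
--   if bits < 0:
--     raise ValueError('Negative bits not allowed.')
--   raw_bytes = (bits - 1) // 8 + 1
--   result = 1 << max(raw_bytes - 1, 0).bit_length()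
--   if result > 8:
--     raise ValueError('Value greater than 8 bytes.')
--   return result
-- ===== Notes on version B (the rewrite author's own statement) =====
-- stated objective: idiomatic
-- what changed: Replaces the linear scan over the candidate list [1,2,4,8] with a closed-form bit-length power-of-two round-up; Pre_ admits exactly the bit counts that fit in eight bytes, outside it both programs raise (A with a NameError on the overflow path due to the undefined 'value' in its error format, B with ValueError).
import Mathlib
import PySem

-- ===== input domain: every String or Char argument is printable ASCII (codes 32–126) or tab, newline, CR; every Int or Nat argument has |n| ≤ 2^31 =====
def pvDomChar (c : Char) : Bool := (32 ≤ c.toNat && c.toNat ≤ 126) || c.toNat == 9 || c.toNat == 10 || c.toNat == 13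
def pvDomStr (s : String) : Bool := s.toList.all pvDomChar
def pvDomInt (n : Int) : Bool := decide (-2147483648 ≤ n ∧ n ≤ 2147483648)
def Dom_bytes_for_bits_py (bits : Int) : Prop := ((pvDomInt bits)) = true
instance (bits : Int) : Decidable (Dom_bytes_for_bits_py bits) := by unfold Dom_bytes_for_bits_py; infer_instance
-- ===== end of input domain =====

-- B replaces A's scan over [1,2,4,8] with a closed-form bit-length round-up (idiomatic; same cost).
-- ===== PORT A =====
-- the for-loop over [1, 2, 4, 8] with early return; none = loop fell through (A raises there)
def pvLoopA : List Int → Int → Option Int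
  | [], _ => none
  | x :: xs, raw_bytes => if x ≥ raw_bytes then some x else pvLoopA xs raw_bytes

def bytes_for_bits_py (bits : Int) : Int :=
  if bits < 0 then 0  -- A raises ValueError; excluded by Pre_
  else
    let raw_bytes := PySem.Int.floordiv (bits - 1) 8 + 1
    match pvLoopA [1, 2, 4, 8] raw_bytes with
    | some x => x
    | none => 0  -- A raises; excluded by Pre_

-- ===== PORT B =====
def bytes_for_bits_py_alt (bits : Int) : Int :=
  if bits < 0 then 0  -- B raises ValueError; excluded by Pre_
  else
    let raw_bytes := PySem.Int.floordiv (bits - 1) 8 + 1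
    let result : Int := 1 <<< (max (raw_bytes - 1) 0).toNat.size  -- Python n.bit_length() for n ≥ 0 = Nat.size
    if result > 8 then 0  -- B raises ValueError; excluded by Pre_
    else result

-- ===== PRECONDITION & SPEC =====
-- Pre_ admits exactly the inputs on which A returns; outside it A raises (ValueError on negative bits, NameError on the overflow path).
def Pre_bytes_for_bits_py (bits : Int) : Prop := 0 ≤ bits ∧ bits ≤ 64
instance (bits : Int) : Decidable (Pre_bytes_for_bits_py bits) := by unfold Pre_bytes_for_bits_py; infer_instance
def pvWitness_bytes_for_bits_py : Int := 16
def Spec_bytes_for_bits_py (bits : Int) (out : Int) : Prop := out = bytes_for_bits_py_alt bits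
instance (bits : Int) (out : Int) : Decidable (Spec_bytes_for_bits_py bits out) := by unfold Spec_bytes_for_bits_py; infer_instance

-- ===== CLAIM (what is proved, stated in full; the proofs are below) =====
def Claim_equal_bytes_for_bits_py : Prop := ∀ (bits : Int), Dom_bytes_for_bits_py bits → Pre_bytes_for_bits_py bits → Spec_bytes_for_bits_py bits (bytes_for_bits_py bits)

-- ===== LEMMAS AND PROOFS =====

-- ===== VERDICT =====
theorem bytes_for_bits_py_spec : Claim_equal_bytes_for_bits_py := by
  intro bits _ hpre
  unfold Spec_bytes_for_bits_py
  obtain ⟨h0, h64⟩ := hpre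
  interval_cases bits <;> decide
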